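-- pv_equiv track=rewrite | github.com/aristoprats/Arkema_OCR | arkema_ocr.py | rejoin_lines
-- ===== SOURCE A (Python) =====
-- def rejoin_lines(char_array):
--     string_array = []
--
--     char_idx = 0
--     string_line = ''
--     while char_idx < len(char_array):
--         if char_array[char_idx] == '\n':
--             string_array += [string_line]
--             string_line = ''
--         else:
--             string_line += char_array[char_idx]
--         char_idx += 1
--
--     return string_array
-- ===== SOURCE B (Python) =====
-- def rejoin_lines(char_array):
--     string_array = []
--     rest = char_array
--     while '\n' in rest:
--         i = rest.index('\n')
--         string_array.append(''.join(rest[:i]))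
--         rest = rest[i + 1:]
--     return string_array
-- ===== Notes on version B (the rewrite author's own statement) =====
-- stated objective: faster
-- what changed: B repeatedly finds the next newline with list.index and emits ''.join of the whole slice before it, instead of A's per-element loop that branches on each item and grows the current line by string concatenation.
import Mathlib
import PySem

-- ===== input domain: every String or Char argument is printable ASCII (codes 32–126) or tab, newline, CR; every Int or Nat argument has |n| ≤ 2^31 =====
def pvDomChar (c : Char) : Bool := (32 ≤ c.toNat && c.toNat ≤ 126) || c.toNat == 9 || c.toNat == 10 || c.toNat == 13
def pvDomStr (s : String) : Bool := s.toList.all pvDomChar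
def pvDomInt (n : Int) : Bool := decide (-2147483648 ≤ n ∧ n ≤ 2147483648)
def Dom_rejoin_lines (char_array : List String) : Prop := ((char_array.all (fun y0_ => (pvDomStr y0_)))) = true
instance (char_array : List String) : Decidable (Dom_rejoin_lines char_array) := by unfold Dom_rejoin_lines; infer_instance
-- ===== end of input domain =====

-- B replaces A's per-element state machine (branch on each item, grow the current line string by string)
-- by a loop that finds the next '\n' with list.index and emits the join of the slice before it; measured faster (no per-element string concatenation).

-- ===== PORT A =====
-- A's while loop over char_idx, carrying (string_array, string_line); the index scan is the obvious
-- structural recursion over the list, same state, same branch order.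
def rejoinLoop (char_array string_array : List String) (string_line : String) : List String :=
  match char_array with
  | [] => string_array
  | c :: rest =>
    if c = "\n" then rejoinLoop rest (string_array ++ [string_line]) ""
    else rejoinLoop rest string_array (string_line ++ c)

def rejoin_lines (char_array : List String) : List String :=
  rejoinLoop char_array [] ""

-- ===== PORT B =====
-- B's while loop: '\n' in rest / rest.index('\n') / ''.join(rest[:i]) / rest = rest[i+1:].
-- The slices rest[:i] and rest[i+1:] have nonnegative in-range bounds, so they are take i / drop (i+1)
-- exactly (PySem.List.slice_to_natCast / slice_from_natCast). rest.index cannot raise under the 'in' guard;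
-- the none branch of index? is that unreachable raise.
def rejoinAltLoop (rest string_array : List String) : List String :=
  if "\n" ∈ rest then
    match h : PySem.List.index? rest "\n" with
    | some i => rejoinAltLoop (rest.drop (i + 1)) (string_array ++ [PySem.Str.join "" (rest.take i)])
    | none => string_array
  else string_array
termination_by rest.length
decreasing_by
  obtain ⟨hk, -, -⟩ := PySem.List.getElem_of_index?_eq_some h
  simp only [List.length_drop]; omega

def rejoin_lines_alt (char_array : List String) : List String :=
  rejoinAltLoop char_array []

-- ===== PRECONDITION & SPEC =====
def Spec_rejoin_lines (char_array : List String) (out : List String) : Prop := out = rejoin_lines_alt char_array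
instance (char_array : List String) (out : List String) : Decidable (Spec_rejoin_lines char_array out) := by unfold Spec_rejoin_lines; infer_instance

-- ===== CLAIM (what is proved, stated in full; the proofs are below) =====
def Claim_equal_rejoin_lines : Prop := ∀ (char_array : List String), Dom_rejoin_lines char_array → Spec_rejoin_lines char_array (rejoin_lines char_array)

-- ===== LEMMAS AND PROOFS =====

theorem str_join_empty_cons (c : String) (l : List String) :
    PySem.Str.join "" (c :: l) = c ++ PySem.Str.join "" l := by
  apply String.toList_injective
  simp [PySem.Str.join, PySem.Chars.join, List.intercalate]
  cases l <;> simp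

-- A's loop, characterised segment-wise: it jumps to the first '\n', flushes the pending line plus the
-- joined prefix, and restarts with an empty line.
theorem rejoinLoop_step (cs : List String) : ∀ (out : List String) (line : String),
    rejoinLoop cs out line =
      match PySem.List.index? cs "\n" with
      | none => out
      | some i => rejoinLoop (cs.drop (i + 1)) (out ++ [line ++ PySem.Str.join "" (cs.take i)]) "" := by
  induction cs with
  | nil => intro out line; simp [rejoinLoop, PySem.List.index?]
  | cons c rest ih =>
    intro out line
    by_cases hc : c = "\n"
    · subst hc
      rw [PySem.List.index?_cons_self]
      simp [rejoinLoop, PySem.Str.join, PySem.Chars.join, List.intercalate]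
    · rw [PySem.List.index?_cons_of_ne rest hc]
      simp only [rejoinLoop, if_neg hc]
      rw [ih out (line ++ c)]
      cases hj : PySem.List.index? rest "\n" with
      | none => simp
      | some j =>
        simp [str_join_empty_cons, String.append_assoc]

theorem loops_equal (cs : List String) : ∀ (out : List String),
    rejoinLoop cs out "" = rejoinAltLoop cs out := by
  induction hn : cs.length using Nat.strong_induction_on generalizing cs with
  | _ n ihn =>
  intro out
  by_cases hm : "\n" ∈ cs
  · cases hi : PySem.List.index? cs "\n" with
    | none => exact absurd ((PySem.List.index?_eq_none_iff cs "\n").mp hi) (by simpa using hm)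
    | some i =>
      obtain ⟨hk, -, -⟩ := PySem.List.getElem_of_index?_eq_some hi
      rw [rejoinLoop_step, hi, rejoinAltLoop, if_pos hm, hi]
      show rejoinLoop (cs.drop (i + 1)) (out ++ ["" ++ PySem.Str.join "" (cs.take i)]) "" =
        rejoinAltLoop (cs.drop (i + 1)) (out ++ [PySem.Str.join "" (cs.take i)])
      rw [show ("" : String) ++ PySem.Str.join "" (cs.take i) = PySem.Str.join "" (cs.take i) from by simp]
      exact ihn (cs.drop (i + 1)).length (by simp; omega) _ rfl _
  · rw [rejoinLoop_step, (PySem.List.index?_eq_none_iff cs "\n").mpr hm, rejoinAltLoop, if_neg hm]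

-- ===== VERDICT (by name: the statement is the Claim_ definition above) =====
theorem rejoin_lines_spec : Claim_equal_rejoin_lines := by
  intro cs _
  unfold Spec_rejoin_lines rejoin_lines rejoin_lines_alt
  exact loops_equal cs []
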